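-- pv_equiv track=rewrite | github.com/addenergyx/sunset-hills-coding-challenge | app.py | generate_sunrise
-- ===== SOURCE A (Python) =====
-- def generate_sunrise(buildings):
--
--     prev_building = []
--     sunrise = []
--     for building in buildings[::-1]:
--
--         if not prev_building or building > max(prev_building):
--             sunrise.append(True)
--         else:
--             sunrise.append(False)
--
--         prev_building.append(building)
--
--     sunrise_buildings = sunrise.count(True)
--
--     sunrise = sunrise[::-1]
--
--     return sunrise
-- ===== SOURCE B (Python) =====
-- def generate_sunrise(buildings):
--     flags = []
--     best = None
--     for b in reversed(buildings):
--         if best is None or b > best: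
--             flags.append(True)
--             best = b
--         else:
--             flags.append(False)
--     flags.reverse()
--     return flags
-- ===== Notes on version B (the rewrite author's own statement) =====
-- stated objective: faster
-- what changed: Replaced the O(n^2) loop that recomputes max(prev_building) over a growing list at every step with a single right-to-left pass carrying the running suffix maximum in one variable.
import Mathlib
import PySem

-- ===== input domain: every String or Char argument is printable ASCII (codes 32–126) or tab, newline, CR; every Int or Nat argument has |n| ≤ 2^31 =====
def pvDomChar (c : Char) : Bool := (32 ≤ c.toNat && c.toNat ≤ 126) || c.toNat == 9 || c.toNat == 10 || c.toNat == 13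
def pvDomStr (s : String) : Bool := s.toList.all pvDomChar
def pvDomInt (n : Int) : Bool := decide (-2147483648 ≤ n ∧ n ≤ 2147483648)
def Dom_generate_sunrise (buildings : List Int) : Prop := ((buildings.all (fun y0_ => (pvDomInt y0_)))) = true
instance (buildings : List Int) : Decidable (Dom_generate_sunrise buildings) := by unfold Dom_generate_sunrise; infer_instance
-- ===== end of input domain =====

-- B replaces the quadratic "max(prev_building) each step" loop by a single
-- right-to-left pass carrying the running suffix maximum in one variable (O(n) vs O(n^2)).

-- ===== PORT A =====
-- Python max(xs) on a nonempty Int list: foldl max over the list (only called nonempty).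
def pyMaxA (xs : List Int) : Int := xs.tail.foldl max (xs.headD 0)

-- for building in buildings[::-1]: ... ; buildings[::-1] is the exact reverse.
def generate_sunrise (buildings : List Int) : List Bool :=
  let st := buildings.reverse.foldl
    (fun (s : List Int × List Bool) (building : Int) =>
      let sunrise :=
        if s.1.isEmpty || decide (building > pyMaxA s.1) then s.2 ++ [true]
        else s.2 ++ [false]
      (s.1 ++ [building], sunrise))
    ([], [])
  st.2.reverse

-- ===== PORT B =====
-- one pass over reversed(buildings) carrying the running maximum (best), then reverse
def generate_sunrise_alt (buildings : List Int) : List Bool :=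
  let st := buildings.reverse.foldl
    (fun (s : Option Int × List Bool) (b : Int) =>
      match s.1 with
      | none => (some b, s.2 ++ [true])
      | some best => if b > best then (some b, s.2 ++ [true]) else (some best, s.2 ++ [false]))
    (none, [])
  st.2.reverse

-- ===== PRECONDITION & SPEC =====
def Spec_generate_sunrise (buildings : List Int) (out : List Bool) : Prop := out = generate_sunrise_alt buildings
instance (buildings : List Int) (out : List Bool) : Decidable (Spec_generate_sunrise buildings out) := by unfold Spec_generate_sunrise; infer_instance

-- ===== CLAIM (what is proved, stated in full; the proofs are below) =====
def Claim_equal_generate_sunrise : Prop := ∀ (buildings : List Int), Dom_generate_sunrise buildings → Spec_generate_sunrise buildings (generate_sunrise buildings)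

-- ===== LEMMAS AND PROOFS =====

-- ===== VERDICT (by name: the statement is the Claim_ definition above) =====
lemma max?_concat (xs : List Int) (b : Int) :
    (xs ++ [b]).max? = some (match xs.max? with | none => b | some m => max m b) := by
  cases xs with
  | nil => rfl
  | cons c cs =>
    simp only [List.cons_append, List.max?, List.foldl_append, List.foldl_cons, List.foldl_nil]

lemma pyMaxA_of_max? (xs : List Int) (m : Int) (h : xs.max? = some m) : pyMaxA xs = m := by
  cases xs with
  | nil => simp at h
  | cons d ds =>
    simp only [List.max?] at h
    exact Option.some.inj h

-- joint invariant of the two folds over the same (reversed) input list l: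
-- A's prev list is l itself, B's running best is l.max?, and the flag lists agree
lemma fold_pair (l : List Int) :
    l.foldl
      (fun (s : List Int × List Bool) (building : Int) =>
        let sunrise :=
          if s.1.isEmpty || decide (building > pyMaxA s.1) then s.2 ++ [true]
          else s.2 ++ [false]
        (s.1 ++ [building], sunrise))
      ([], [])
    = (l,
       (l.foldl
         (fun (s : Option Int × List Bool) (b : Int) =>
           match s.1 with
           | none => (some b, s.2 ++ [true])
           | some best => if b > best then (some b, s.2 ++ [true]) else (some best, s.2 ++ [false]))
         (none, [])).2)
    ∧ (l.foldl
         (fun (s : Option Int × List Bool) (b : Int) =>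
           match s.1 with
           | none => (some b, s.2 ++ [true])
           | some best => if b > best then (some b, s.2 ++ [true]) else (some best, s.2 ++ [false]))
         (none, [])).1 = l.max? := by
  induction l using List.reverseRecOn with
  | nil => exact ⟨rfl, rfl⟩
  | append_singleton xs x ih =>
    obtain ⟨ha, hb⟩ := ih
    simp only [List.foldl_append, List.foldl_cons, List.foldl_nil, ha, hb]
    cases h : xs.max? with
    | none =>
      have hxs : xs = [] := List.max?_eq_none_iff.mp h
      subst hxs
      exact ⟨rfl, by simp⟩
    | some m =>
      have hne : xs.isEmpty = false := by
        rcases xs with _ | _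
        · simp at h
        · rfl
      have hmax : pyMaxA xs = m := pyMaxA_of_max? _ _ h
      by_cases hx : x > m
      · refine ⟨by simp [hne, hmax, hx], ?_⟩
        simp [hx, max?_concat, h, max_eq_right (le_of_lt hx)]
      · refine ⟨by simp [hne, hmax, hx], ?_⟩
        simp [hx, max?_concat, h, max_eq_left (le_of_not_gt hx)]

theorem generate_sunrise_spec : Claim_equal_generate_sunrise := by
  intro bs _
  unfold Spec_generate_sunrise generate_sunrise generate_sunrise_alt
  rw [(fold_pair bs.reverse).1]
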